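/- GENERATED by tools/mkcompositions.py from design/units.gif.tsv (unit `DGifSlurp.COMPOSITION`) — do not edit.
   THE PROOF of the composition unit `DGifSlurp.COMPOSITION`: the 14 segments of `DGifSlurp` chain into its contract, by the theorem
   `Gif.Spec.DGifSlurp.compose` (proved next to the cut assertions). -/
import Gif.Spec.Units.DGifSlurp_COMPOSITION

/-- The segments of `DGifSlurp` compose into its contract. -/
theorem Gif.Spec.Proved.DGifSlurp_COMPOSITION_ok : Gif.Spec.DGifSlurp_COMPOSITION.Statement := by
  intro Lay _hLay μ _hμ u₀ h_DGifSlurp_P h_DGifSlurp_1 h_DGifSlurp_2 h_DGifSlurp_3 h_DGifSlurp_4 h_DGifSlurp_5 h_DGifSlurp_6 h_DGifSlurp_7 h_DGifSlurp_8 h_DGifSlurp_9 h_DGifSlurp_10 h_DGifSlurp_11 h_DGifSlurp_12 h_DGifSlurp_E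
  apply Gif.Spec.DGifSlurp.compose
  all_goals assumption
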